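-- pv_equiv track=rewrite | github.com/SzymonKowalik/dyskretna_wiadomosc | main.py | sprawdz_pozycje
-- ===== SOURCE A (Python) =====
-- def sprawdz_pozycje(pozycja, przyklad):
--     """Sprawdza czy pozycja w wyniku jest zerem czy jedynką."""
--     dl_czesci = 2 ** pozycja
--     polowa_czesci = dl_czesci // 2
--     ilosc_czesci = len(przyklad) // dl_czesci
--
--     zmiana = 0
--     bez_zmiany = 0
--
--     for i in range(ilosc_czesci):
--         czesc = przyklad[i*dl_czesci:(i+1)*dl_czesci]
--         for j in range(polowa_czesci):
--             if czesc[j] == czesc[j+polowa_czesci]: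
--                 bez_zmiany += 1
--             else:
--                 zmiana += 1
--     return '1' if zmiana > bez_zmiany else '0'
-- ===== SOURCE B (Python) =====
-- def sprawdz_pozycje(pozycja, przyklad):
--     """Sprawdza czy pozycja w wyniku jest zerem czy jedynka."""
--     dl = 2 ** pozycja
--     pol = dl // 2
--     n = (len(przyklad) // dl) * dl
--     zm = 0
--     for i in range(n):
--         if i % dl < pol:
--             if przyklad[i] != przyklad[i + pol]:
--                 zm += 1
--             else:
--                 zm -= 1
--     return '1' if zm > 0 else '0'
-- ===== Notes on version B (the rewrite author's own statement) =====
-- stated objective: alternative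
-- what changed: Replaces the nested block-slicing loops (slice each block, compare halves, keep two counters) with a single flat index loop over the complete-block prefix, selecting pair positions by i % block_length < half and maintaining one signed mismatch-minus-match counter.
import Mathlib
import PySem

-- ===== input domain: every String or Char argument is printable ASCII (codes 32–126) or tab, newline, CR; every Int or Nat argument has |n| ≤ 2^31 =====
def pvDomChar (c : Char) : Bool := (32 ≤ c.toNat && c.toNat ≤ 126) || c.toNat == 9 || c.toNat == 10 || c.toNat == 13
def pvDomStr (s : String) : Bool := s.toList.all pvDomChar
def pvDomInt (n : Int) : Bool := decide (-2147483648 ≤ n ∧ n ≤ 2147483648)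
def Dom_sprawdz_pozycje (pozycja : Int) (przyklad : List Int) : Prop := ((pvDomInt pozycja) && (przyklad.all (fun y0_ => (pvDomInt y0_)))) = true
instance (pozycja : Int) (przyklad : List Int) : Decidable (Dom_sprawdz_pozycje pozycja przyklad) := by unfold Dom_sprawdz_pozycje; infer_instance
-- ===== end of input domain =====

-- B replaces A's nested block-slicing loops (two counters) with one flat index loop over the
-- complete-block prefix keeping a single signed mismatch-minus-match counter (objective: alternative).

-- ===== PORT A =====
def sprawdz_pozycje (pozycja : Int) (przyklad : List Int) : String :=
  let dl_czesci : Int := 2 ^ pozycja.toNat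
  let polowa_czesci : Int := PySem.Int.floordiv dl_czesci 2
  let ilosc_czesci : Int := PySem.Int.floordiv (przyklad.length : Int) dl_czesci
  let st :=
    (PySem.List.pyRange 0 ilosc_czesci 1).foldl (fun (st : Int × Int) i =>
      let czesc := PySem.List.slice przyklad (some (i * dl_czesci)) (some ((i + 1) * dl_czesci))
      (PySem.List.pyRange 0 polowa_czesci 1).foldl (fun st j =>
        if PySem.List.pyGet? czesc j == PySem.List.pyGet? czesc (j + polowa_czesci)
        then (st.1, st.2 + 1) else (st.1 + 1, st.2)) st)
      ((0 : Int), (0 : Int))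
  if st.1 > st.2 then "1" else "0"

-- ===== PORT B =====
def sprawdz_pozycje_alt (pozycja : Int) (przyklad : List Int) : String :=
  let dl : Int := 2 ^ pozycja.toNat
  let pol : Int := PySem.Int.floordiv dl 2
  let n : Int := PySem.Int.floordiv (przyklad.length : Int) dl * dl
  let zm :=
    (PySem.List.pyRange 0 n 1).foldl (fun (zm : Int) i =>
      if PySem.Int.mod i dl < pol then
        (if PySem.List.pyGet? przyklad i != PySem.List.pyGet? przyklad (i + pol) then zm + 1 else zm - 1)
      else zm) 0
  if zm > 0 then "1" else "0"

-- ===== PRECONDITION & SPEC =====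
-- Pre_ excludes negative pozycja: there Python's 2 ** pozycja is a float and A raises TypeError.
def Pre_sprawdz_pozycje (pozycja : Int) (przyklad : List Int) : Prop := 0 ≤ pozycja
instance (pozycja : Int) (przyklad : List Int) : Decidable (Pre_sprawdz_pozycje pozycja przyklad) := by unfold Pre_sprawdz_pozycje; infer_instance
def pvWitness_sprawdz_pozycje : Int × List Int := (1, [0, 1, 1, 1])
def Spec_sprawdz_pozycje (pozycja : Int) (przyklad : List Int) (out : String) : Prop := out = sprawdz_pozycje_alt pozycja przyklad
instance (pozycja : Int) (przyklad : List Int) (out : String) : Decidable (Spec_sprawdz_pozycje pozycja przyklad out) := by unfold Spec_sprawdz_pozycje; infer_instance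

-- ===== CLAIM (what is proved, stated in full; the proofs are below) =====
def Claim_equal_sprawdz_pozycje : Prop := ∀ (pozycja : Int) (przyklad : List Int), Dom_sprawdz_pozycje pozycja przyklad → Pre_sprawdz_pozycje pozycja przyklad → Spec_sprawdz_pozycje pozycja przyklad (sprawdz_pozycje pozycja przyklad)

-- ===== LEMMAS AND PROOFS =====

-- A's nested loop, all-Nat indices into the original list (slices resolved)
def pvA (xs : List Int) (dlN polN ilN : Nat) : Int × Int :=
  (List.range ilN).foldl (fun st q =>
    (List.range polN).foldl (fun (st : Int × Int) (j : Nat) =>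
      if xs[q * dlN + j]? == xs[q * dlN + j + polN]? then (st.1, st.2 + 1) else (st.1 + 1, st.2)) st)
    ((0 : Int), (0 : Int))

-- B's flat loop, all-Nat indices
def pvB (xs : List Int) (dlN polN n : Nat) : Int :=
  List.foldl (fun (zm : Int) (i : Nat) =>
    if i % dlN < polN then (if xs[i]? != xs[i + polN]? then zm + 1 else zm - 1) else zm) 0 (List.range n)

theorem pvRangeNat (m : Nat) :
    PySem.List.pyRange 0 (m : Int) 1 = (List.range m).map (fun k : Nat => (k : Int)) := by
  rw [PySem.List.pyRange_one]; simp

theorem pvFoldRange {β : Type} (m : Nat) (f : β → Int → β) (init : β) :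
    (PySem.List.pyRange 0 (m : Int) 1).foldl f init
      = List.foldl (fun (a : β) (k : Nat) => f a (k : Int)) init (List.range m) := by
  rw [pvRangeNat, List.foldl_map]

theorem pvBridgeA (pozycja : Int) (przyklad : List Int) :
    sprawdz_pozycje pozycja przyklad =
      (if (pvA przyklad (2 ^ pozycja.toNat) (2 ^ pozycja.toNat / 2) (przyklad.length / 2 ^ pozycja.toNat)).1
          > (pvA przyklad (2 ^ pozycja.toNat) (2 ^ pozycja.toNat / 2) (przyklad.length / 2 ^ pozycja.toNat)).2
       then "1" else "0") := by
  simp only [sprawdz_pozycje, pvA]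
  rw [show PySem.Int.floordiv ((2:Int) ^ pozycja.toNat) 2 = ((2 ^ pozycja.toNat / 2 : Nat) : Int) from by
        exact_mod_cast PySem.Int.floordiv_natCast (2 ^ pozycja.toNat) 2,
      show PySem.Int.floordiv (przyklad.length : Int) ((2:Int) ^ pozycja.toNat) = ((przyklad.length / 2 ^ pozycja.toNat : Nat) : Int) from by
        exact_mod_cast PySem.Int.floordiv_natCast przyklad.length (2 ^ pozycja.toNat)]
  simp only [pvFoldRange]
  refine congrArg (fun st : Int × Int => if st.1 > st.2 then "1" else "0")
    (PySem.List.foldl_congr_mem _ _ _ _ ?_)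
  intro st q _
  refine PySem.List.foldl_congr_mem _ _ _ _ ?_
  intro st' j hj
  rw [List.mem_range] at hj
  have hle : 2 ^ pozycja.toNat / 2 + 2 ^ pozycja.toNat / 2 ≤ 2 ^ pozycja.toNat := by omega
  have hqd : (q : Int) * ((2:Int) ^ pozycja.toNat) = ((q * 2 ^ pozycja.toNat : Nat) : Int) := by push_cast; ring
  have hqd1 : ((q : Int) + 1) * ((2:Int) ^ pozycja.toNat) = (((q + 1) * 2 ^ pozycja.toNat : Nat) : Int) := by push_cast; ring
  rw [hqd, hqd1, PySem.List.slice_natCast]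
  rw [show (q + 1) * 2 ^ pozycja.toNat - q * 2 ^ pozycja.toNat = 2 ^ pozycja.toNat from by
        rw [Nat.succ_mul]; omega]
  rw [show ((j : Int) + ((2 ^ pozycja.toNat / 2 : Nat) : Int)) = ((j + 2 ^ pozycja.toNat / 2 : Nat) : Int) from by push_cast; ring]
  rw [PySem.List.pyGet?_natCast, PySem.List.pyGet?_natCast]
  rw [List.getElem?_take_of_lt (by omega), List.getElem?_take_of_lt (by omega),
      List.getElem?_drop, List.getElem?_drop]
  rw [show q * 2 ^ pozycja.toNat + (j + 2 ^ pozycja.toNat / 2) = q * 2 ^ pozycja.toNat + j + 2 ^ pozycja.toNat / 2 from by omega]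

theorem pvBridgeB (pozycja : Int) (przyklad : List Int) :
    sprawdz_pozycje_alt pozycja przyklad =
      (if 0 < pvB przyklad (2 ^ pozycja.toNat) (2 ^ pozycja.toNat / 2)
              (przyklad.length / 2 ^ pozycja.toNat * 2 ^ pozycja.toNat)
       then "1" else "0") := by
  simp only [sprawdz_pozycje_alt, pvB]
  rw [show PySem.Int.floordiv ((2:Int) ^ pozycja.toNat) 2 = ((2 ^ pozycja.toNat / 2 : Nat) : Int) from by
        exact_mod_cast PySem.Int.floordiv_natCast (2 ^ pozycja.toNat) 2,
      show PySem.Int.floordiv (przyklad.length : Int) ((2:Int) ^ pozycja.toNat) = ((przyklad.length / 2 ^ pozycja.toNat : Nat) : Int) from by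
        exact_mod_cast PySem.Int.floordiv_natCast przyklad.length (2 ^ pozycja.toNat)]
  rw [show ((przyklad.length / 2 ^ pozycja.toNat : Nat) : Int) * ((2:Int) ^ pozycja.toNat)
        = ((przyklad.length / 2 ^ pozycja.toNat * 2 ^ pozycja.toNat : Nat) : Int) from by push_cast; ring]
  simp only [pvFoldRange]
  refine congrArg (fun zm : Int => if 0 < zm then "1" else "0")
    (PySem.List.foldl_congr_mem _ _ _ _ ?_)
  intro zm i _
  rw [show ((2:Int) ^ pozycja.toNat) = ((2 ^ pozycja.toNat : Nat) : Int) from by push_cast; ring]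
  rw [PySem.Int.mod_natCast, show ((i : Int) + ((2 ^ pozycja.toNat / 2 : Nat) : Int)) = ((i + 2 ^ pozycja.toNat / 2 : Nat) : Int) from by push_cast; ring]
  rw [PySem.List.pyGet?_natCast, PySem.List.pyGet?_natCast]
  simp only [Nat.cast_lt]

theorem pvDiffFoldl (l : List Nat) (c : Nat → Bool) (st : Int × Int) :
    (l.foldl (fun (st : Int × Int) (j : Nat) =>
        if c j then (st.1, st.2 + 1) else (st.1 + 1, st.2)) st).1
      - (l.foldl (fun (st : Int × Int) (j : Nat) =>
        if c j then (st.1, st.2 + 1) else (st.1 + 1, st.2)) st).2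
    = st.1 - st.2 + (l.map (fun j => if c j then (-1 : Int) else 1)).sum := by
  induction l generalizing st with
  | nil => simp
  | cons x xs ih =>
    simp only [List.foldl_cons, List.map_cons, List.sum_cons]
    rw [ih]
    by_cases hx : c x <;> simp [hx] <;> ring

theorem pvBSum (xs : List Int) (dlN polN n : Nat) :
    pvB xs dlN polN n
      = ((List.range n).map (fun i => if i % dlN < polN then
          (if xs[i]? != xs[i + polN]? then (1 : Int) else -1) else 0)).sum := by
  unfold pvB
  rw [PySem.List.foldl_congr_mem _ _ (fun (zm : Int) (i : Nat) => zm +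
        (if i % dlN < polN then (if xs[i]? != xs[i + polN]? then (1 : Int) else -1) else 0)) _ ?_]
  · rw [PySem.List.foldl_add]; simp
  · intro acc x _
    by_cases h1 : x % dlN < polN <;> by_cases h2 : (xs[x]? != xs[x + polN]?) = true <;>
      simp [h1, h2] <;> ring

theorem pvBlock (xs : List Int) (dlN polN k : Nat) (h : dlN = polN + polN) :
    ((List.range dlN).map (fun t => if (k * dlN + t) % dlN < polN then
        (if xs[k * dlN + t]? != xs[k * dlN + t + polN]? then (1 : Int) else -1) else 0)).sum
    = ((List.range polN).map (fun j =>
        if xs[k * dlN + j]? == xs[k * dlN + j + polN]? then (-1 : Int) else 1)).sum := by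
  subst h
  rw [List.range_add, List.map_append, List.sum_append, List.map_map]
  have h1 : ((List.range polN).map (fun t => if (k * (polN + polN) + t) % (polN + polN) < polN then
        (if xs[k * (polN + polN) + t]? != xs[k * (polN + polN) + t + polN]? then (1 : Int) else -1) else 0))
      = ((List.range polN).map (fun j =>
        if xs[k * (polN + polN) + j]? == xs[k * (polN + polN) + j + polN]? then (-1 : Int) else 1)) := by
    apply List.map_congr_left
    intro t ht
    rw [List.mem_range] at ht
    have hm : (k * (polN + polN) + t) % (polN + polN) = t := by
      rw [Nat.add_comm, Nat.add_mul_mod_self_right]; exact Nat.mod_eq_of_lt (by omega)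
    rw [hm, if_pos (by omega)]
    cases hc : (xs[k * (polN + polN) + t]? == xs[k * (polN + polN) + t + polN]?) <;> simp [hc, bne]
  have h2 : ((List.range polN).map ((fun t => if (k * (polN + polN) + t) % (polN + polN) < polN then
        (if xs[k * (polN + polN) + t]? != xs[k * (polN + polN) + t + polN]? then (1 : Int) else -1) else 0) ∘ (fun x => polN + x)))
      = (List.range polN).map (fun _ => (0 : Int)) := by
    apply List.map_congr_left
    intro t ht
    rw [List.mem_range] at ht
    simp only [Function.comp]
    have hm : (k * (polN + polN) + (polN + t)) % (polN + polN) = polN + t := by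
      rw [Nat.add_comm, Nat.add_mul_mod_self_right]; exact Nat.mod_eq_of_lt (by omega)
    rw [hm, if_neg (by omega)]
  rw [h1, h2]
  simp

theorem pvMain (xs : List Int) (dlN polN ilN : Nat) (h : dlN = polN + polN) :
    (pvA xs dlN polN ilN).1 - (pvA xs dlN polN ilN).2 = pvB xs dlN polN (ilN * dlN) := by
  induction ilN with
  | zero => simp [pvA, pvB]
  | succ k ih =>
    have hA : pvA xs dlN polN (k + 1)
        = (List.range polN).foldl (fun (st : Int × Int) (j : Nat) =>
            if xs[k * dlN + j]? == xs[k * dlN + j + polN]? then (st.1, st.2 + 1) else (st.1 + 1, st.2))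
          (pvA xs dlN polN k) := by
      simp only [pvA, List.range_succ, List.foldl_append, List.foldl_cons, List.foldl_nil]
    rw [hA, pvDiffFoldl, ih]
    rw [pvBSum, pvBSum]
    rw [show (k + 1) * dlN = k * dlN + dlN from by ring, List.range_add, List.map_append,
        List.sum_append, List.map_map]
    have := pvBlock xs dlN polN k h
    rw [show ((List.range dlN).map ((fun i => if i % dlN < polN then
          (if xs[i]? != xs[i + polN]? then (1 : Int) else -1) else 0) ∘ (fun x => k * dlN + x)))
        = ((List.range dlN).map (fun t => if (k * dlN + t) % dlN < polN then
          (if xs[k * dlN + t]? != xs[k * dlN + t + polN]? then (1 : Int) else -1) else 0)) from rfl]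
    rw [this]

theorem pvZero (xs : List Int) (dlN ilN n : Nat) :
    pvA xs dlN 0 ilN = (0, 0) ∧ pvB xs dlN 0 n = 0 := by
  constructor
  · unfold pvA
    simp only [List.range_zero, List.foldl_nil]
    induction (List.range ilN) with
    | nil => rfl
    | cons x l ih => simpa using ih
  · unfold pvB
    have : ∀ l : List Nat, List.foldl (fun (zm : Int) (i : Nat) =>
        if i % dlN < 0 then (if xs[i]? != xs[i + 0]? then zm + 1 else zm - 1) else zm) 0 l = 0 := by
      intro l; induction l with
      | nil => rfl
      | cons x l ih => simpa using ih
    exact this _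

-- ===== VERDICT (by name: the statement is the Claim_ definition above) =====
theorem sprawdz_pozycje_spec : Claim_equal_sprawdz_pozycje := by
  intro pozycja przyklad _hDom _hPre
  unfold Spec_sprawdz_pozycje
  rw [pvBridgeA pozycja przyklad, pvBridgeB pozycja przyklad]
  have hdiff : (pvA przyklad (2 ^ pozycja.toNat) (2 ^ pozycja.toNat / 2) (przyklad.length / 2 ^ pozycja.toNat)).1
        - (pvA przyklad (2 ^ pozycja.toNat) (2 ^ pozycja.toNat / 2) (przyklad.length / 2 ^ pozycja.toNat)).2
      = pvB przyklad (2 ^ pozycja.toNat) (2 ^ pozycja.toNat / 2)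
          (przyklad.length / 2 ^ pozycja.toNat * 2 ^ pozycja.toNat) := by
    by_cases h0 : pozycja.toNat = 0
    · rw [show (2 ^ pozycja.toNat / 2) = 0 from by rw [h0]; rfl]
      rw [(pvZero przyklad (2 ^ pozycja.toNat) (przyklad.length / 2 ^ pozycja.toNat)
            (przyklad.length / 2 ^ pozycja.toNat * 2 ^ pozycja.toNat)).1,
          (pvZero przyklad (2 ^ pozycja.toNat) (przyklad.length / 2 ^ pozycja.toNat)
            (przyklad.length / 2 ^ pozycja.toNat * 2 ^ pozycja.toNat)).2]
      norm_num
    · exact pvMain przyklad (2 ^ pozycja.toNat) (2 ^ pozycja.toNat / 2)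
        (przyklad.length / 2 ^ pozycja.toNat) (by
          have h1 : 1 ≤ pozycja.toNat := Nat.one_le_iff_ne_zero.mpr h0
          have h2 : 2 ^ pozycja.toNat = 2 * 2 ^ (pozycja.toNat - 1) := by
            rw [← pow_succ']; congr 1; omega
          omega)
  by_cases hzb : (pvA przyklad (2 ^ pozycja.toNat) (2 ^ pozycja.toNat / 2) (przyklad.length / 2 ^ pozycja.toNat)).1
      > (pvA przyklad (2 ^ pozycja.toNat) (2 ^ pozycja.toNat / 2) (przyklad.length / 2 ^ pozycja.toNat)).2
  · rw [if_pos hzb, if_pos (show 0 < pvB przyklad (2 ^ pozycja.toNat) (2 ^ pozycja.toNat / 2)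
        (przyklad.length / 2 ^ pozycja.toNat * 2 ^ pozycja.toNat) by omega)]
  · rw [if_neg hzb, if_neg (show ¬ 0 < pvB przyklad (2 ^ pozycja.toNat) (2 ^ pozycja.toNat / 2)
        (przyklad.length / 2 ^ pozycja.toNat * 2 ^ pozycja.toNat) by omega)]
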